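-- pv_equiv track=rewrite | github.com/kirichokjaroslav/rahrahnmubot | bot/helpers.py | valid_mandatory_fields
-- ===== SOURCE A (Python) =====
-- def valid_mandatory_fields(target_data, fields=set()):
--     """ Checks for missing/empty fields.
--     """
--     if not fields.issubset(set(target_data.keys())):
--         return False
--
--     present_fields = fields.intersection(set(target_data.keys()))
--     values_fields = {target_data[field] for field in present_fields}
--
--     if len({'', None}.intersection(values_fields)) > 0:
--         return False
--
--     return True
-- ===== SOURCE B (Python) =====
-- def valid_mandatory_fields(target_data, fields=set()):
--     """Checks for missing/empty fields: one early-exit pass, no set algebra."""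
--     for field in fields:
--         if field not in target_data:
--             return False
--         value = target_data[field]
--         if value == '' or value is None:
--             return False
--     return True
-- ===== Notes on version B (the rewrite author's own statement) =====
-- stated objective: simpler
-- what changed: Replaced the subset test + value-set construction + set intersection with a single early-exit loop over fields checking presence and non-emptiness directly.
import Mathlib
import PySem

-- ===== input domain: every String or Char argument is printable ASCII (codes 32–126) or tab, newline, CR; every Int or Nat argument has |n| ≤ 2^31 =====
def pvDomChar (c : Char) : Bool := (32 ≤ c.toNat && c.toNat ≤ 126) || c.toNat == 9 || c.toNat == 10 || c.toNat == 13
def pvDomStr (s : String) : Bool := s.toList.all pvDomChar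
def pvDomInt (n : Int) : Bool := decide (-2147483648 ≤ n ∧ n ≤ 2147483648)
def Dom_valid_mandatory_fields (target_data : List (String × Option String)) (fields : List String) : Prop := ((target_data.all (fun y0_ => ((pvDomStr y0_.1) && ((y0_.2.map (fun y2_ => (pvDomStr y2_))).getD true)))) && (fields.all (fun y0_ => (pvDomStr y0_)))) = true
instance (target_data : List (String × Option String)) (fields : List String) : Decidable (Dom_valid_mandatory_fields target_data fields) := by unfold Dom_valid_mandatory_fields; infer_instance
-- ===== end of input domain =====

-- B replaces A's set algebra (subset test + value-set + intersection) with one early-exit pass over fields; equal return value everywhere.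

-- dict lookup target_data[field]: first matching key (dict has unique keys; exact on assoc lists)
def pvLookup (target_data : List (String × Option String)) (k : String) : Option (Option String) :=
  match target_data with
  | [] => none
  | (k', v) :: rest => if k' = k then some v else pvLookup rest k

-- ===== PORT A =====
def valid_mandatory_fields (target_data : List (String × Option String)) (fields : List String) : Bool :=
  let keySet : PySem.Set String := PySem.Set.ofList (target_data.map Prod.fst)
  let fieldSet : PySem.Set String := PySem.Set.ofList fields
  if ¬ (PySem.Set.issubset fieldSet keySet) then false
  else
    let present_fields := PySem.Set.inter fieldSet keySet
    -- target_data[field]: the subset check guarantees the key is present, so .getD none never fires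
    let values_fields : PySem.Set (Option String) :=
      PySem.Set.ofList (present_fields.map (fun f => (pvLookup target_data f).getD none))
    if PySem.Set.len (PySem.Set.inter (PySem.Set.ofList [some "", none]) values_fields) > 0 then false
    else true

-- ===== PORT B =====
def valid_mandatory_fields_alt (target_data : List (String × Option String)) (fields : List String) : Bool :=
  match fields with
  | [] => true
  | f :: rest =>
    match pvLookup target_data f with
    | none => false
    | some v => if v = some "" ∨ v = none then false else valid_mandatory_fields_alt target_data rest

-- ===== PRECONDITION & SPEC =====
def Spec_valid_mandatory_fields (target_data : List (String × Option String)) (fields : List String) (out : Bool) : Prop := out = valid_mandatory_fields_alt target_data fields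
instance (target_data : List (String × Option String)) (fields : List String) (out : Bool) : Decidable (Spec_valid_mandatory_fields target_data fields out) := by unfold Spec_valid_mandatory_fields; infer_instance

-- ===== CLAIM (what is proved, stated in full; the proofs are below) =====
def Claim_equal_valid_mandatory_fields : Prop := ∀ (target_data : List (String × Option String)) (fields : List String), Dom_valid_mandatory_fields target_data fields → Spec_valid_mandatory_fields target_data fields (valid_mandatory_fields target_data fields)

-- ===== LEMMAS AND PROOFS =====

def pvChk (target_data : List (String × Option String)) (f : String) : Bool :=
  match pvLookup target_data f with
  | none => false
  | some v => !(v = some "" ∨ v = none)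

theorem pvLookup_isSome_iff_mem (td : List (String × Option String)) (f : String) :
    (pvLookup td f).isSome ↔ f ∈ td.map Prod.fst := by
  induction td with
  | nil => simp [pvLookup]
  | cons p rest ih =>
    obtain ⟨k, v⟩ := p
    by_cases h : k = f
    · subst h; simp [pvLookup]
    · simp [pvLookup, h, ih, Ne.symm h]

theorem alt_eq_all (td : List (String × Option String)) (fs : List String) :
    valid_mandatory_fields_alt td fs = fs.all (pvChk td) := by
  induction fs with
  | nil => simp [valid_mandatory_fields_alt]
  | cons f rest ih =>
    simp only [valid_mandatory_fields_alt, List.all_cons, ih, pvChk]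
    cases h : pvLookup td f with
    | none => simp
    | some v => by_cases hv : v = some "" ∨ v = none <;> simp [hv]

theorem pvLookup_eq_none (td : List (String × Option String)) (f : String)
    (h : f ∉ td.map Prod.fst) : pvLookup td f = none := by
  cases hl : pvLookup td f with
  | none => rfl
  | some v => exact absurd ((pvLookup_isSome_iff_mem td f).mp (by simp [hl])) h

theorem a_eq_all (td : List (String × Option String)) (fs : List String) :
    valid_mandatory_fields td fs = fs.all (pvChk td) := by
  unfold valid_mandatory_fields
  simp only []
  split_ifs with h1 h2
  · -- subset holds, some present value is '' or None
    have hsub := (PySem.Set.issubset_iff _ _).mp h1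
    have h2' : ∃ y, y ∈ PySem.Set.inter (PySem.Set.ofList [some "", none])
        (PySem.Set.ofList ((PySem.Set.inter (PySem.Set.ofList fs)
          (PySem.Set.ofList (td.map Prod.fst))).map (fun f => (pvLookup td f).getD none))) := by
      rcases List.exists_mem_of_length_pos (by
        simpa [PySem.Set.len] using h2) with ⟨y, hy⟩
      exact ⟨y, hy⟩
    obtain ⟨y, hy⟩ := h2'
    rw [PySem.Set.mem_inter] at hy
    obtain ⟨hybad, hyval⟩ := hy
    rw [PySem.Set.mem_ofList, List.mem_map] at hyval
    obtain ⟨f, hfp, hfy⟩ := hyval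
    rw [PySem.Set.mem_inter, PySem.Set.mem_ofList, PySem.Set.mem_ofList] at hfp
    symm
    rw [List.all_eq_false]
    refine ⟨f, hfp.1, ?_⟩
    cases hl : pvLookup td f with
    | none =>
      have := (pvLookup_isSome_iff_mem td f).mpr hfp.2
      simp [hl] at this
    | some v =>
      simp only [pvChk, hl]
      have : v = y := by simpa [hl] using hfy
      subst this
      simp only [PySem.Set.mem_ofList] at hybad
      simp at hybad
      rcases hybad with h | h <;> simp [h]
  · -- subset holds, no bad value: every field checks out
    have hsub := (PySem.Set.issubset_iff _ _).mp h1
    symm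
    rw [List.all_eq_true]
    intro f hf
    have hfk : f ∈ td.map Prod.fst := by
      have := hsub f (by rwa [PySem.Set.mem_ofList])
      rwa [PySem.Set.mem_ofList] at this
    cases hl : pvLookup td f with
    | none => exact absurd hl (by
        have := (pvLookup_isSome_iff_mem td f).mpr hfk
        cases h : pvLookup td f <;> simp_all)
    | some v =>
      simp only [pvChk, hl]
      by_contra hbad
      simp only [Bool.not_eq_true, Bool.not_eq_false'] at hbad
      have hv : v = some "" ∨ v = none := by
        by_contra hc
        simp [hc] at hbad
      apply h2
      have hvmem : v ∈ PySem.Set.inter (PySem.Set.ofList [some "", none])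
          (PySem.Set.ofList ((PySem.Set.inter (PySem.Set.ofList fs)
            (PySem.Set.ofList (td.map Prod.fst))).map (fun f => (pvLookup td f).getD none))) := by
        rw [PySem.Set.mem_inter]
        constructor
        · rw [PySem.Set.mem_ofList]; rcases hv with h | h <;> simp [h]
        · rw [PySem.Set.mem_ofList, List.mem_map]
          exact ⟨f, by rw [PySem.Set.mem_inter, PySem.Set.mem_ofList, PySem.Set.mem_ofList]; exact ⟨hf, hfk⟩, by simp [hl]⟩
      simp only [PySem.Set.len, gt_iff_lt]
      exact_mod_cast List.length_pos_of_mem hvmem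
  · -- not a subset: some field has no key
    have h1' : ¬ ∀ x ∈ PySem.Set.ofList fs, x ∈ PySem.Set.ofList (td.map Prod.fst) :=
      fun hh => h1 ((PySem.Set.issubset_iff _ _).mpr hh)
    push Not at h1'
    obtain ⟨f, hf, hfk⟩ := h1'
    rw [PySem.Set.mem_ofList] at hf hfk
    symm
    rw [List.all_eq_false]
    refine ⟨f, hf, ?_⟩
    simp [pvChk, pvLookup_eq_none td f hfk]

-- ===== VERDICT (by name: the statement is the Claim_ definition above) =====
theorem valid_mandatory_fields_spec : Claim_equal_valid_mandatory_fields := by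
  intro td fs _
  unfold Spec_valid_mandatory_fields
  rw [alt_eq_all, a_eq_all]
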